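-- pv_equiv track=rewrite | github.com/VinothRajasekar/practice | Arrays/count.py | jobOffers
-- ===== SOURCE A (Python) =====
-- def jobOffers(scores, lowerLimits, upperLimits):
--
--     res = [0 for _ in range(len(lowerLimits))]
--     count = 0
--     for i in range (len(scores)):
--
--         for j in range(len(lowerLimits)):
--
--             if scores[i] >= lowerLimits[j]:
--
--                 if scores[i] <= upperLimits[j]:
--
--                     res[j] = res[j] + 1
--                     if res[j] == upperLimits[j]:
--                        j = lowerLimits
--     return res
-- ===== SOURCE B (Python) =====
-- def jobOffers(scores, lowerLimits, upperLimits):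
--     srt = sorted(scores)
--     n = len(srt)
--
--     def lower_bound(x):
--         # first index i with srt[i] >= x (hand-written: no imports available)
--         lo, hi = 0, n
--         while lo < hi:
--             mid = (lo + hi) // 2
--             if srt[mid] < x:
--                 lo = mid + 1
--             else:
--                 hi = mid
--         return lo
--
--     res = []
--     for j in range(len(lowerLimits)):
--         hi_i = lower_bound(upperLimits[j] + 1)
--         lo_i = lower_bound(lowerLimits[j])
--         res.append(hi_i - lo_i if hi_i > lo_i else 0)
--     return res
-- ===== Notes on version B (the rewrite author's own statement) =====
-- stated objective: faster
-- what changed: Instead of scanning every interval for every score (nested loops), B sorts the scores once and answers each interval with two hand-written binary searches (counts = lower_bound(upper+1) - lower_bound(lower)).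
-- outside the precondition, e.g. on jobOffers([5], [1, 10], [10]): A returns [1, 0], B raises IndexError
import Mathlib
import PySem

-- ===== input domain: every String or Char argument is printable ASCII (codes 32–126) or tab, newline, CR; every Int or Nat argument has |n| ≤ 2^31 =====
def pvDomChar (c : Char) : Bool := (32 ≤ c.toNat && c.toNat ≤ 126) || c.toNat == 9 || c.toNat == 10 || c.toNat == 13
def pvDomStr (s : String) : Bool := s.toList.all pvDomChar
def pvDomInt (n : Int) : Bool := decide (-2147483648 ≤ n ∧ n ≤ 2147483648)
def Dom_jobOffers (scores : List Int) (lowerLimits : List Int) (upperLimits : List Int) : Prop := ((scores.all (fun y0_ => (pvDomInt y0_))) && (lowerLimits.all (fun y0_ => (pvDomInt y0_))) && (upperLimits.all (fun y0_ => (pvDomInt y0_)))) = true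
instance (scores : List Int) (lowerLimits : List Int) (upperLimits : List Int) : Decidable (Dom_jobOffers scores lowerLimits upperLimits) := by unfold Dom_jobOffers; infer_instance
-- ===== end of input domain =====

-- B replaces A's per-score scan over all intervals with one sort of the scores plus two
-- hand-written binary searches per interval (objective: faster).


-- ===== PORT A =====
-- Literal port of A's nested loops.  The Python's 'count = 0' and the inner 'j = lowerLimits' are
-- dead code (the loop variable is immediately overwritten by the next 'for j' iteration) and have
-- no porting counterpart.  Indexing is pyGetD, exact under Pre_ (every access is then in range).
def jobOffers (scores : List Int) (lowerLimits : List Int) (upperLimits : List Int) : List Int :=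
  let res0 : List Int := (PySem.List.pyRange 0 (lowerLimits.length : Int) 1).map (fun _ => 0)
  (PySem.List.pyRange 0 (scores.length : Int) 1).foldl (fun res i =>
    (PySem.List.pyRange 0 (lowerLimits.length : Int) 1).foldl (fun res j =>
      if PySem.List.pyGetD lowerLimits j 0 ≤ PySem.List.pyGetD scores i 0 then
        if PySem.List.pyGetD scores i 0 ≤ PySem.List.pyGetD upperLimits j 0 then
          PySem.List.pySetD res j (PySem.List.pyGetD res j 0 + 1)
        else res
      else res) res) res0

-- ===== PORT B =====
-- Source B's hand-written while-loop binary search (Source B cannot import bisect, since A imports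
-- nothing): first index in [lo, hi) at which srt[·] ≥ x.
def lowerBoundAux (srt : List Int) (x : Int) (lo hi : Nat) : Nat :=
  if _h : lo < hi then
    let mid := (lo + hi) / 2
    if srt.getD mid 0 < x then lowerBoundAux srt x (mid + 1) hi
    else lowerBoundAux srt x lo mid
  else lo
termination_by hi - lo
decreasing_by all_goals omega

def jobOffers_alt (scores : List Int) (lowerLimits : List Int) (upperLimits : List Int) : List Int :=
  let srt := PySem.List.sorted scores (fun x => x) false
  (PySem.List.pyRange 0 (lowerLimits.length : Int) 1).map (fun j =>
    let hi_i := lowerBoundAux srt (PySem.List.pyGetD upperLimits j 0 + 1) 0 srt.length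
    let lo_i := lowerBoundAux srt (PySem.List.pyGetD lowerLimits j 0) 0 srt.length
    if lo_i < hi_i then (hi_i : Int) - (lo_i : Int) else 0)

-- ===== PRECONDITION & SPEC =====
-- Pre_ requires an upper limit for every lower limit.  When lowerLimits is longer, A indexes
-- upperLimits[j] only lazily (only when some score reaches lowerLimits[j]) and so either raises
-- IndexError or returns a value whose trailing entries are accidental zeros, while B always pairs
-- each lower limit with an upper limit and raises IndexError there; those inputs are excluded.
def Pre_jobOffers (scores : List Int) (lowerLimits : List Int) (upperLimits : List Int) : Prop :=
  lowerLimits.length ≤ upperLimits.length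
instance (scores : List Int) (lowerLimits : List Int) (upperLimits : List Int) : Decidable (Pre_jobOffers scores lowerLimits upperLimits) := by unfold Pre_jobOffers; infer_instance

def pvWitness_jobOffers : List Int × List Int × List Int := ([1, 5, 8], [0, 4], [3, 9])

def Spec_jobOffers (scores : List Int) (lowerLimits : List Int) (upperLimits : List Int) (out : List Int) : Prop := out = jobOffers_alt scores lowerLimits upperLimits
instance (scores : List Int) (lowerLimits : List Int) (upperLimits : List Int) (out : List Int) : Decidable (Spec_jobOffers scores lowerLimits upperLimits out) := by unfold Spec_jobOffers; infer_instance

-- ===== CLAIM (what is proved, stated in full; the proofs are below) =====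
def Claim_equal_jobOffers : Prop := ∀ (scores : List Int) (lowerLimits : List Int) (upperLimits : List Int), Dom_jobOffers scores lowerLimits upperLimits → Pre_jobOffers scores lowerLimits upperLimits → Spec_jobOffers scores lowerLimits upperLimits (jobOffers scores lowerLimits upperLimits)

-- ===== LEMMAS AND PROOFS =====

-- The per-interval membership test both programs count.
def pvCond (lowerLimits upperLimits : List Int) (k : Nat) (s : Int) : Bool :=
  decide (lowerLimits.getD k 0 ≤ s ∧ s ≤ upperLimits.getD k 0)

-- A's inner loop over the intervals bumps exactly the first n entries whose interval contains s.
lemma innerA_getD (lowerLimits upperLimits : List Int) (s : Int) (n : Nat) (res : List Int)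
    (hn : n ≤ res.length) :
    ((PySem.List.pyRange 0 (n : Int) 1).foldl (fun res j =>
      if PySem.List.pyGetD lowerLimits j 0 ≤ s then
        if s ≤ PySem.List.pyGetD upperLimits j 0 then
          PySem.List.pySetD res j (PySem.List.pyGetD res j 0 + 1)
        else res
      else res) res).length = res.length ∧
    ∀ k : Nat, ((PySem.List.pyRange 0 (n : Int) 1).foldl (fun res j =>
      if PySem.List.pyGetD lowerLimits j 0 ≤ s then
        if s ≤ PySem.List.pyGetD upperLimits j 0 then
          PySem.List.pySetD res j (PySem.List.pyGetD res j 0 + 1)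
        else res
      else res) res).getD k 0
      = res.getD k 0 + (if k < n ∧ pvCond lowerLimits upperLimits k s then 1 else 0) := by
  induction n with
  | zero => simp
  | succ n ih =>
    have hsplit : PySem.List.pyRange 0 ((n+1 : Nat) : Int) 1
        = PySem.List.pyRange 0 (n : Int) 1 ++ [(n : Int)] := by
      have := PySem.List.pyRange_one_succ_right (a := 0) (b := (n : Int)) (by positivity)
      push_cast
      convert this using 2
    rw [hsplit, List.foldl_append]
    obtain ⟨hlen, hget⟩ := ih (by omega)
    set res' := (PySem.List.pyRange 0 (n : Int) 1).foldl (fun res j =>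
      if PySem.List.pyGetD lowerLimits j 0 ≤ s then
        if s ≤ PySem.List.pyGetD upperLimits j 0 then
          PySem.List.pySetD res j (PySem.List.pyGetD res j 0 + 1)
        else res
      else res) res with hres'
    simp only [List.foldl_cons, List.foldl_nil, PySem.List.pyGetD_natCast,
      PySem.List.pySetD_natCast]
    have hsucc : ∀ k : Nat, (k < n + 1) ↔ (k < n ∨ k = n) := by omega
    constructor
    · split_ifs <;> simp [hlen]
    · intro k
      by_cases h1 : lowerLimits.getD n 0 ≤ s
      · by_cases h2 : s ≤ upperLimits.getD n 0
        · rw [if_pos h1, if_pos h2]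
          have hcn : pvCond lowerLimits upperLimits n s = true := by
            unfold pvCond; simp only [decide_eq_true_eq]; exact ⟨h1, h2⟩
          by_cases hk : k = n
          · subst hk
            have hklen : k < res'.length := by rw [hlen]; omega
            rw [List.getD_eq_getElem _ _ (by simpa using hklen),
              List.getElem_set_self (by simpa using hklen), hget k]
            simp [hcn]
          · have hst : (res'.set n (res'.getD n 0 + 1)).getD k 0 = res'.getD k 0 := by
              simp [List.getD, List.getElem?_set_ne (by omega : n ≠ k)]
            rw [hst, hget k]
            congr 1
            simp [hsucc k, hk]
        · rw [if_pos h1, if_neg h2, hget k]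
          have hcn : pvCond lowerLimits upperLimits n s = false := by
            unfold pvCond; simp only [decide_eq_false_iff_not, not_and, not_le]; intro _; omega
          congr 1
          by_cases hk : k = n
          · subst hk; simp [hcn]
          · simp [hsucc k, hk]
      · rw [if_neg h1, hget k]
        have hcn : pvCond lowerLimits upperLimits n s = false := by
          unfold pvCond; simp only [decide_eq_false_iff_not, not_and, not_le]; intro h; omega
        congr 1
        by_cases hk : k = n
        · subst hk; simp [hcn]
        · simp [hsucc k, hk]

-- A's whole fold: entry k ends as its start value plus the number of scores inside interval k.
lemma outerA_getD (lowerLimits upperLimits : List Int) (scores : List Int) (res : List Int)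
    (hres : lowerLimits.length ≤ res.length) :
    ((scores.foldl (fun res s =>
      (PySem.List.pyRange 0 (lowerLimits.length : Int) 1).foldl (fun res j =>
        if PySem.List.pyGetD lowerLimits j 0 ≤ s then
          if s ≤ PySem.List.pyGetD upperLimits j 0 then
            PySem.List.pySetD res j (PySem.List.pyGetD res j 0 + 1)
          else res
        else res) res) res).length = res.length) ∧
    ∀ k : Nat, k < lowerLimits.length →
      (scores.foldl (fun res s =>
        (PySem.List.pyRange 0 (lowerLimits.length : Int) 1).foldl (fun res j =>
          if PySem.List.pyGetD lowerLimits j 0 ≤ s then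
            if s ≤ PySem.List.pyGetD upperLimits j 0 then
              PySem.List.pySetD res j (PySem.List.pyGetD res j 0 + 1)
            else res
          else res) res) res).getD k 0
        = res.getD k 0 + ((scores.countP (fun s => pvCond lowerLimits upperLimits k s)) : Int) := by
  induction scores generalizing res with
  | nil => simp
  | cons s rest ih =>
    simp only [List.foldl_cons]
    obtain ⟨hilen, higet⟩ := innerA_getD lowerLimits upperLimits s lowerLimits.length res hres
    obtain ⟨hlen, hget⟩ := ih _ (by rw [hilen]; exact hres)
    refine ⟨by rw [hlen, hilen], ?_⟩
    intro k hk
    rw [hget k hk, higet k]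
    simp only [List.countP_cons]
    by_cases hc : pvCond lowerLimits upperLimits k s = true
    · simp [hc, hk]
      ring
    · simp [hc]

-- In a sorted list, position i holds a value < x iff i is below the count of values < x.
lemma sorted_lt_iff_lt_countP (l : List Int) (hs : l.Pairwise (· ≤ ·)) (x : Int) :
    ∀ i : Nat, (hi : i < l.length) → (l[i] < x ↔ i < l.countP (fun s => decide (s < x))) := by
  induction l with
  | nil => intro i hi; simp at hi
  | cons a t ih =>
    intro i hi
    have ha : ∀ y ∈ t, a ≤ y := (List.pairwise_cons.mp hs).1
    have ht : t.Pairwise (· ≤ ·) := (List.pairwise_cons.mp hs).2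
    cases i with
    | zero =>
      simp only [List.getElem_cons_zero, List.countP_cons]
      by_cases hax : a < x
      · simp [hax]
      · have h0 : t.countP (fun s => decide (s < x)) = 0 := by
          rw [List.countP_eq_zero]
          intro y hy
          simp only [decide_eq_true_eq, not_lt]
          exact le_trans (not_lt.mp hax) (ha y hy)
        rw [h0]
        simp only [decide_eq_true_eq, if_neg hax]
        omega
    | succ i =>
      simp only [List.getElem_cons_succ, List.countP_cons]
      rw [ih ht i (by simpa using hi)]
      by_cases hax : a < x
      · simp [hax]
      · have h0 : t.countP (fun s => decide (s < x)) = 0 := by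
          rw [List.countP_eq_zero]
          intro y hy
          simp only [decide_eq_true_eq, not_lt]
          exact le_trans (not_lt.mp hax) (ha y hy)
        rw [h0]
        simp only [decide_eq_true_eq, if_neg hax]
        omega

-- Correctness of the hand-written binary search on a sorted list.
lemma lowerBoundAux_eq_countP (srt : List Int) (hs : srt.Pairwise (· ≤ ·)) (x : Int) :
    ∀ n lo hi, hi - lo ≤ n → lo ≤ srt.countP (fun s => decide (s < x)) →
      srt.countP (fun s => decide (s < x)) ≤ hi → hi ≤ srt.length →
      lowerBoundAux srt x lo hi = srt.countP (fun s => decide (s < x)) := by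
  intro n
  induction n with
  | zero =>
    intro lo hi hm h1 h2 h3
    rw [lowerBoundAux, dif_neg (by omega)]
    omega
  | succ n ih =>
    intro lo hi hm h1 h2 h3
    rw [lowerBoundAux]
    by_cases hlt : lo < hi
    · rw [dif_pos hlt]
      show (if srt.getD ((lo + hi) / 2) 0 < x then lowerBoundAux srt x ((lo + hi) / 2 + 1) hi
            else lowerBoundAux srt x lo ((lo + hi) / 2)) = _
      have hmid : lo ≤ (lo + hi) / 2 ∧ (lo + hi) / 2 < hi := by omega
      have hmlen : (lo + hi) / 2 < srt.length := by omega
      rw [List.getD_eq_getElem _ _ hmlen]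
      have hiff := sorted_lt_iff_lt_countP srt hs x ((lo + hi) / 2) hmlen
      by_cases hx : srt[(lo + hi) / 2] < x
      · rw [if_pos hx]
        exact ih _ _ (by omega) (by have := hiff.mp hx; omega) h2 h3
      · rw [if_neg hx]
        have : ¬ ((lo + hi) / 2 < srt.countP (fun s => decide (s < x))) := fun h => hx (hiff.mpr h)
        exact ih _ _ (by omega) h1 (by omega) (by omega)
    · rw [dif_neg hlt]
      omega

-- Splitting a count over a predicate implied by another.
lemma countP_sub (l : List Int) (p q : Int → Bool) (h : ∀ s, p s = true → q s = true) :
    l.countP q = l.countP p + l.countP (fun s => q s && !(p s)) := by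
  induction l with
  | nil => simp
  | cons a t ih =>
    simp only [List.countP_cons, ih]
    by_cases hp : p a = true
    · simp [hp, h a hp]; omega
    · simp only [Bool.not_eq_true] at hp
      by_cases hq : q a = true
      · simp [hp, hq]
        omega
      · simp [hp, hq]

-- The clamped difference of the two binary-search counts is the interval count.
lemma count_interval (l : List Int) (L U : Int) :
    (if l.countP (fun s => decide (s < L)) < l.countP (fun s => decide (s < U + 1))
     then (l.countP (fun s => decide (s < U + 1)) : Int) - (l.countP (fun s => decide (s < L)) : Int)
     else 0)
    = (l.countP (fun s => decide (L ≤ s ∧ s ≤ U)) : Int) := by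
  by_cases hLU : L ≤ U + 1
  · have hsub := countP_sub l (fun s => decide (s < L)) (fun s => decide (s < U + 1))
      (by intro s h; simp only [decide_eq_true_eq] at h ⊢; omega)
    have hc : l.countP (fun s => decide (s < U + 1) && !(decide (s < L)))
        = l.countP (fun s => decide (L ≤ s ∧ s ≤ U)) := by
      apply List.countP_congr
      intro s _
      by_cases h1 : L ≤ s <;> by_cases h2 : s ≤ U
      · simp [h1, h2]
      · simp [h1, h2]
      · simp [h1, h2]
      · simp [h1, h2]
    rw [hc] at hsub
    rw [hsub]
    split_ifs with h <;> push_cast <;> omega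
  · have hmono : l.countP (fun s => decide (s < U + 1)) ≤ l.countP (fun s => decide (s < L)) := by
      apply List.countP_mono_left
      intro s _ h
      simp only [decide_eq_true_eq] at h ⊢
      omega
    have h0 : l.countP (fun s => decide (L ≤ s ∧ s ≤ U)) = 0 := by
      rw [List.countP_eq_zero]
      intro s _
      simp only [decide_eq_true_eq, not_and, not_le]
      omega
    rw [if_neg (by omega), h0]
    simp

theorem jobOffers_spec_aux (scores lowerLimits upperLimits : List Int) :
    jobOffers scores lowerLimits upperLimits = jobOffers_alt scores lowerLimits upperLimits := by
  unfold jobOffers jobOffers_alt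
  have hbridge := PySem.List.foldl_pyRange_zero_pyGetD' scores 0
    (fun res s => (PySem.List.pyRange 0 (lowerLimits.length : Int) 1).foldl (fun res j =>
      if PySem.List.pyGetD lowerLimits j 0 ≤ s then
        if s ≤ PySem.List.pyGetD upperLimits j 0 then
          PySem.List.pySetD res j (PySem.List.pyGetD res j 0 + 1)
        else res
      else res) res)
    ((PySem.List.pyRange 0 (lowerLimits.length : Int) 1).map (fun _ => (0 : Int)))
  rw [hbridge]
  have hres0len : ((PySem.List.pyRange 0 (lowerLimits.length : Int) 1).map (fun _ => (0 : Int))).length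
      = lowerLimits.length := by
    simp [PySem.List.length_pyRange_one]
  have hres0get : ∀ k : Nat,
      ((PySem.List.pyRange 0 (lowerLimits.length : Int) 1).map (fun _ => (0 : Int))).getD k 0 = 0 := by
    intro k
    simp only [List.getD, List.getElem?_map]
    cases (PySem.List.pyRange 0 (lowerLimits.length : Int) 1)[k]? <;> simp
  obtain ⟨hAlen, hAget⟩ := outerA_getD lowerLimits upperLimits scores
    ((PySem.List.pyRange 0 (lowerLimits.length : Int) 1).map (fun _ => (0 : Int)))
    (le_of_eq hres0len.symm)
  have hs : (PySem.List.sorted scores (fun x => x) false).Pairwise (· ≤ ·) := by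
    simpa using PySem.List.sorted_pairwise scores (fun x => x)
  have hperm := PySem.List.sorted_perm scores (fun x => x) false
  apply List.ext_getElem
  · rw [hAlen, hres0len]
    simp [PySem.List.length_pyRange_one]
  · intro k hk1 hk2
    have hkm : k < lowerLimits.length := by rw [hAlen, hres0len] at hk1; exact hk1
    -- A side
    rw [← List.getD_eq_getElem _ 0 hk1, hAget k hkm, hres0get k]
    -- B side
    rw [List.getElem_map, PySem.List.getElem_pyRange_one]
    simp only [zero_add, PySem.List.pyGetD_natCast]
    have hlb : ∀ y : Int,
        lowerBoundAux (PySem.List.sorted scores (fun x => x) false) y 0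
          (PySem.List.sorted scores (fun x => x) false).length
        = (PySem.List.sorted scores (fun x => x) false).countP (fun s => decide (s < y)) := by
      intro y
      exact lowerBoundAux_eq_countP _ hs y
        ((PySem.List.sorted scores (fun x => x) false).length) 0
        ((PySem.List.sorted scores (fun x => x) false).length)
        (by omega) (Nat.zero_le _) List.countP_le_length (le_refl _)
    rw [hlb, hlb]
    have := count_interval (PySem.List.sorted scores (fun x => x) false)
      (lowerLimits.getD k 0) (upperLimits.getD k 0)
    rw [this, hperm.countP_eq]
    simp [pvCond]

-- ===== VERDICT (by name: the statement is the Claim_ definition above) =====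
theorem jobOffers_spec : Claim_equal_jobOffers := by
  intro scores lowerLimits upperLimits _ _
  exact jobOffers_spec_aux scores lowerLimits upperLimits
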